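-- pv_equiv track=rewrite | github.com/minhdqdev-org/todopro-cli | src/todopro_cli/utils/ui/formatters.py | calculate_unique_suffixes
-- ===== SOURCE A (Python) =====
-- def calculate_unique_suffixes(task_ids: list[str]) -> dict[str, int]:
--     """
--     Calculate minimum unique suffix length for each task ID.
--
--     Starts from length 1 and grows until unique among all IDs.
--
--     Args:
--         task_ids: List of full task IDs
--
--     Returns:
--         Dict mapping task_id -> required suffix length
--     """
--     if not task_ids:
--         return {}
--
--     result = {}
--
--     for task_id in task_ids:
--         # Start with length 1, grow until unique
--         for length in range(1, len(task_id) + 1):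
--             suffix = task_id[-length:]
--
--             # Check if this suffix is unique
--             conflicts = [
--                 tid for tid in task_ids if tid != task_id and tid.endswith(suffix)
--             ]
--
--             if not conflicts:
--                 result[task_id] = length
--                 break
--         else:
--             # Use full ID if no unique suffix found (shouldn't happen with UUIDs)
--             result[task_id] = len(task_id)
--
--     return result
-- ===== SOURCE B (Python) =====
-- def calculate_unique_suffixes(task_ids: list[str]) -> dict[str, int]:
--     """Closed-form: the minimal unique suffix length of an ID is
--     1 + (longest common suffix with any OTHER id), capped at len(id)."""
--     result = {}
--     for task_id in task_ids:
--         if task_id in result: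
--             continue
--         rev = task_id[::-1]
--         m = 0
--         for other in task_ids:
--             if other == task_id:
--                 continue
--             k = 0
--             for x, y in zip(rev, other[::-1]):
--                 if x != y:
--                     break
--                 k += 1
--             if k > m:
--                 m = k
--         result[task_id] = min(len(task_id), m + 1)
--     return result
-- ===== Notes on version B (the rewrite author's own statement) =====
-- stated objective: alternative
-- what changed: Replaces A's grow-the-suffix-and-rescan search (for each id, try lengths 1..len and rebuild the conflict list with endswith each time) by a closed form: answer = min(len(id), 1 + max common-suffix length with any other id), computed in one pass over the other ids per id, with the dict entry computed once per distinct id.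
import Mathlib
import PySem

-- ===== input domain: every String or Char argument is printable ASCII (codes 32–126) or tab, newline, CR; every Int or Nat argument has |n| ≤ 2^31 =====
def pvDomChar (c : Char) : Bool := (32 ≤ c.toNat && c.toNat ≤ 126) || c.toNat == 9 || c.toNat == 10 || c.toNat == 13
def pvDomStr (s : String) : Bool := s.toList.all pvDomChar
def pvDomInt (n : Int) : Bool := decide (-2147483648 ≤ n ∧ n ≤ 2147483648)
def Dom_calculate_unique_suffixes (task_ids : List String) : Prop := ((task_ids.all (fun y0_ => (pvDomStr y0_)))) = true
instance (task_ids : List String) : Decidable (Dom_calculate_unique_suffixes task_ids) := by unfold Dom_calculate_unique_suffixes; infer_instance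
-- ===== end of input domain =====

-- B replaces A's grow-the-suffix-and-rescan search by the closed form
-- min(len(id), 1 + max common-suffix length with any other id); same return value (objective: alternative).


-- ===== PORT A =====
-- inner 'for length in range(1, len+1): … break / else:' loop of A;
-- the branch condition IS the 'conflicts' comprehension, tested for emptiness
def lenLoopA (task_ids : List String) (task_id : String) : List Int → Int
  | [] => PySem.Str.len task_id                                -- for-else: use full ID
  | length :: rest =>
      if task_ids.filter (fun tid => decide (tid ≠ task_id) &&
           PySem.Str.endswith tid (PySem.Str.slice task_id (some (-length)) none)) = []
      then length
      else lenLoopA task_ids task_id rest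

def calculate_unique_suffixes (task_ids : List String) : List (String × Int) :=
  if task_ids = [] then (PySem.Dict.empty : PySem.Dict String Int).items
  else
    (task_ids.foldl
      (fun result task_id =>
        result.insert task_id
          (lenLoopA task_ids task_id (PySem.List.pyRange 1 (PySem.Str.len task_id + 1) 1)))
      (PySem.Dict.empty : PySem.Dict String Int)).items

-- ===== PORT B =====
-- the 'k' counted by Source B's 'for x, y in zip(rev, other[::-1]): if x != y: break; k += 1'
def cplB : List Char → List Char → Int
  | x :: xs, y :: ys => if x = y then cplB xs ys + 1 else 0
  | _, _ => 0

-- Source B's 'm = 0; for other in task_ids: …' loop (rev = task_id[::-1] is List.reverse)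
def maxLcsB (task_ids : List String) (task_id : String) : Int :=
  task_ids.foldl
    (fun m other =>
      if other = task_id then m
      else if cplB task_id.toList.reverse other.toList.reverse > m
           then cplB task_id.toList.reverse other.toList.reverse
           else m)
    0

def calculate_unique_suffixes_alt (task_ids : List String) : List (String × Int) :=
  (task_ids.foldl
    (fun result task_id =>
      if result.contains task_id then result      -- 'if task_id in result: continue'
      else result.insert task_id
        (min (PySem.Str.len task_id) (maxLcsB task_ids task_id + 1)))
    (PySem.Dict.empty : PySem.Dict String Int)).items

-- ===== PRECONDITION & SPEC =====
def Spec_calculate_unique_suffixes (task_ids : List String) (out : List (String × Int)) : Prop := out = calculate_unique_suffixes_alt task_ids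
instance (task_ids : List String) (out : List (String × Int)) : Decidable (Spec_calculate_unique_suffixes task_ids out) := by unfold Spec_calculate_unique_suffixes; infer_instance

-- ===== CLAIM (what is proved, stated in full; the proofs are below) =====
def Claim_equal_calculate_unique_suffixes : Prop := ∀ (task_ids : List String), Dom_calculate_unique_suffixes task_ids → Spec_calculate_unique_suffixes task_ids (calculate_unique_suffixes task_ids)

-- ===== LEMMAS AND PROOFS =====

theorem cplB_nonneg (a b : List Char) : 0 ≤ cplB a b := by
  induction a generalizing b with
  | nil => simp [cplB]
  | cons x xs ih =>
    cases b with
    | nil => simp [cplB]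
    | cons y ys =>
      simp only [cplB]
      split
      · have := ih ys; omega
      · omega

-- take L a is a prefix of b iff the common prefix has length ≥ L (for L ≤ |a|)
theorem take_prefix_iff_cplB (L : Nat) (a b : List Char) (hL : L ≤ a.length) :
    a.take L <+: b ↔ (L : Int) ≤ cplB a b := by
  induction L generalizing a b with
  | zero => simpa using cplB_nonneg a b
  | succ n ih =>
    cases a with
    | nil => simp at hL
    | cons x xs =>
      cases b with
      | nil =>
        simp only [List.take_succ_cons, cplB]
        constructor
        · intro h; exact absurd (List.IsPrefix.length_le h) (by simp)
        · intro h; omega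
      | cons y ys =>
        simp only [List.take_succ_cons, cplB, List.cons_prefix_cons]
        split
        · rename_i hxy
          subst hxy
          rw [ih xs ys (by simpa using hL)]
          constructor
          · rintro ⟨-, h⟩; omega
          · intro h; exact ⟨rfl, by omega⟩
        · rename_i hxy
          constructor
          · rintro ⟨h, -⟩; exact absurd h hxy
          · intro h; omega

-- Source B's guarded running max never goes below its start
theorem foldl_max_init_le (ids : List String) (t : String) (f : String → Int) (init : Int) :
    init ≤ ids.foldl (fun m o => if o = t then m else if f o > m then f o else m) init := by
  induction ids generalizing init with
  | nil => simp
  | cons o os ih =>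
    simp only [List.foldl_cons]
    refine le_trans ?_ (ih _)
    split
    · exact le_refl _
    · split <;> omega

-- Source B's guarded running max, characterised by '<'
theorem foldl_max_lt_iff (ids : List String) (t : String) (f : String → Int) (L init : Int) :
    (ids.foldl (fun m o => if o = t then m else if f o > m then f o else m) init < L)
      ↔ (init < L ∧ ∀ o ∈ ids, o ≠ t → f o < L) := by
  induction ids generalizing init with
  | nil => simp
  | cons o os ih =>
    simp only [List.foldl_cons]
    rw [ih]
    constructor
    · rintro ⟨h1, h2⟩
      refine ⟨?_, fun x hx hxt => ?_⟩
      · split at h1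
        · exact h1
        · split at h1 <;> omega
      · rcases List.mem_cons.mp hx with rfl | hx
        · split at h1
          · exact absurd ‹x = t› hxt
          · split at h1 <;> omega
        · exact h2 x hx hxt
    · rintro ⟨h1, h2⟩
      refine ⟨?_, fun x hx hxt => h2 x (List.mem_cons_of_mem _ hx) hxt⟩
      split
      · exact h1
      · rename_i ho
        have := h2 o (List.mem_cons_self ..) ho
        split <;> omega

-- A's conflict test at suffix length L (1 ≤ L ≤ |t|) holds for no id iff every other id's
-- common suffix with t is shorter than L
theorem conflicts_empty_iff (ids : List String) (t : String) (L : Nat)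
    (h1 : 1 ≤ L) (h2 : L ≤ t.toList.length) :
    (ids.filter (fun tid => decide (tid ≠ t) &&
        PySem.Str.endswith tid (PySem.Str.slice t (some (-(L : Int))) none)) = [])
      ↔ ∀ o ∈ ids, o ≠ t → cplB t.toList.reverse o.toList.reverse < (L : Int) := by
  have hsuffix : (PySem.Str.slice t (some (-(L : Int))) none).toList
      = t.toList.drop (t.toList.length - L) := by
    rw [PySem.Str.toList_slice, PySem.Chars.slice_eq_listSlice,
      PySem.List.slice_from_neg_natCast t.toList L (by omega)]
  have hlen : t.toList.length - (t.toList.length - L) = L := by omega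
  have key : ∀ o : String,
      PySem.Str.endswith o (PySem.Str.slice t (some (-(L : Int))) none) = true
        ↔ (L : Int) ≤ cplB t.toList.reverse o.toList.reverse := by
    intro o
    rw [PySem.Str.endswith_eq, PySem.Chars.endswith_iff, hsuffix,
      ← List.reverse_prefix, List.reverse_drop, hlen,
      take_prefix_iff_cplB L _ _ (by simpa using h2)]
  rw [List.filter_eq_nil_iff]
  constructor
  · intro h o ho hot
    have := h o ho
    simp only [Bool.and_eq_true, decide_eq_true_eq, not_and] at this
    have hne := this hot
    have : ¬ ((L : Int) ≤ cplB t.toList.reverse o.toList.reverse) :=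
      fun hle => hne ((key o).mpr hle)
    omega
  · intro h o ho
    simp only [Bool.and_eq_true, decide_eq_true_eq, not_and]
    intro hot
    have := h o ho hot
    intro hends
    rw [key o] at hends
    omega

-- A's inner loop over the remaining lengths [a, …, n] returns min n (M+1)
theorem lenLoopA_range (ids : List String) (t : String) (b : Nat) : ∀ (a : Nat),
    1 ≤ a → a ≤ t.toList.length + 1 → (a : Int) ≤ maxLcsB ids t + 1 →
    t.toList.length + 1 - a = b →
    lenLoopA ids t (PySem.List.pyRange (a : Int) ((t.toList.length : Int) + 1) 1)
      = min (t.toList.length : Int) (maxLcsB ids t + 1) := by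
  have hM : 0 ≤ maxLcsB ids t := foldl_max_init_le ids t _ 0
  induction b with
  | zero =>
    intro a h1 h2 hm hb
    have ha : a = t.toList.length + 1 := by omega
    subst ha
    rw [PySem.List.pyRange_one_eq_nil (by push_cast; omega)]
    have hb' : t.toList.length = t.length := String.length_toList
    simp only [lenLoopA, PySem.Str.len_eq]
    omega
  | succ b ih =>
    intro a h1 h2 hm hb
    have ha : a ≤ t.toList.length := by omega
    rw [PySem.List.pyRange_one_cons (by omega)]
    simp only [lenLoopA]
    split
    · rename_i hempty
      have hall := (conflicts_empty_iff ids t a h1 (by omega)).mp hempty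
      have hlt : maxLcsB ids t < (a : Int) := by
        rw [show maxLcsB ids t = ids.foldl (fun m o => if o = t then m
          else if cplB t.toList.reverse o.toList.reverse > m
               then cplB t.toList.reverse o.toList.reverse else m) 0 from rfl,
          foldl_max_lt_iff]
        exact ⟨by omega, hall⟩
      omega
    · rename_i hne
      have hgt : ¬ maxLcsB ids t < (a : Int) := by
        intro hlt
        apply hne
        rw [conflicts_empty_iff ids t a h1 (by omega)]
        exact ((foldl_max_lt_iff ids t
          (fun o => cplB t.toList.reverse o.toList.reverse) (a : Int) 0).mp hlt).2
      rw [show ((a : Int) + 1) = ((a + 1 : Nat) : Int) by push_cast; ring]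
      exact ih (a + 1) (by omega) (by omega) (by push_cast; omega) (by omega)

-- for any string, the value A stores equals the value B stores
theorem ans_eq (ids : List String) (t : String) :
    lenLoopA ids t (PySem.List.pyRange 1 (PySem.Str.len t + 1) 1)
      = min (PySem.Str.len t) (maxLcsB ids t + 1) := by
  have hM : 0 ≤ maxLcsB ids t := foldl_max_init_le ids t _ 0
  have h := lenLoopA_range ids t t.toList.length 1 (le_refl 1) (by omega) (by omega) (by omega)
  rw [Nat.cast_one] at h
  rw [PySem.Str.len_eq]
  exact h

-- inserting the value a key already holds changes nothing (keys unique)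
theorem dict_insert_self (d : PySem.Dict String Int) (k : String) (v : Int)
    (hnd : d.keys.Nodup) (h : d.get? k = some v) : d.insert k v = d := by
  apply PySem.Dict.ext
  have hc : d.contains k = true := by
    rw [PySem.Dict.contains_eq_isSome_get?, h]; rfl
  rw [PySem.Dict.items_insert_of_contains d v hc]
  refine (List.map_congr_left ?_).trans (List.map_id _)
  intro p hp
  show (if (p.1 == k) = true then (k, v) else p) = id p
  simp only [id]
  split
  · rename_i hpk
    have hpk' : p.1 = k := by simpa using hpk
    have : d.get? k = some p.2 := by
      apply PySem.Dict.get?_of_mem_items d ?_ hnd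
      rw [← hpk']
      exact hp
    rw [h] at this
    have hv : p.2 = v := by injection this with h'; omega
    cases p
    simp_all
  · rfl

-- A's plain insert loop equals B's guarded insert loop, given the per-key value equality
theorem fold_eq (ids : List String) (rest : List String) : ∀ (d : PySem.Dict String Int),
    d.keys.Nodup →
    (∀ k v, d.get? k = some v → v = min (PySem.Str.len k) (maxLcsB ids k + 1)) →
    rest.foldl (fun result t =>
        result.insert t (lenLoopA ids t (PySem.List.pyRange 1 (PySem.Str.len t + 1) 1))) d
      = rest.foldl (fun result t =>
        if result.contains t then result
        else result.insert t (min (PySem.Str.len t) (maxLcsB ids t + 1))) d := by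
  induction rest with
  | nil => intro d _ _; rfl
  | cons t rest ih =>
    intro d hnd hinv
    simp only [List.foldl_cons, ans_eq ids t]
    by_cases hc : d.contains t = true
    · obtain ⟨v, hv⟩ : ∃ v, d.get? t = some v := by
        rw [PySem.Dict.contains_eq_isSome_get?] at hc
        exact Option.isSome_iff_exists.mp hc
      have hveq := hinv t v hv
      rw [dict_insert_self d t _ hnd (by rw [hv, hveq]), if_pos hc]
      exact ih d hnd hinv
    · rw [if_neg hc]
      apply ih
      · exact PySem.Dict.nodup_keys_insert d t _ hnd
      · intro k v hk
        rw [PySem.Dict.get?_insert] at hk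
        split at hk
        · subst ‹k = t›
          injection hk with h'
          omega
        · exact hinv k v hk

-- ===== VERDICT (by name: the statement is the Claim_ definition above) =====
theorem calculate_unique_suffixes_spec : Claim_equal_calculate_unique_suffixes := by
  intro task_ids _
  unfold Spec_calculate_unique_suffixes calculate_unique_suffixes calculate_unique_suffixes_alt
  split
  · subst ‹task_ids = []›
    rfl
  · rw [fold_eq task_ids task_ids PySem.Dict.empty PySem.Dict.nodup_keys_empty
      (fun k v hk => by rw [PySem.Dict.get?_empty] at hk; cases hk)]
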